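-- pv_equiv track=rewrite | github.com/modernmt/modernmt | src/decoder-neural/src/main/python/mmt/textencoder.py | _escape_token
-- ===== SOURCE A (Python) =====
-- def _escape_token(token, alphabet=None):
--     """Escape away underscores and OOV characters and append '_'.
--
--     This allows the token to be expressed as the concatenation of a list
--     of subtokens from the vocabulary. The underscore acts as a sentinel
--     which allows us to invertibly concatenate multiple such lists.
--
--     Args:
--       token: A unicode string to be escaped.
--       alphabet: A set of all characters in the vocabulary's alphabet.
--
--     Returns:
--       escaped_token: An escaped unicode string.
--
--     Raises:
--       ValueError: If the provided token is not unicode.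
--     """
--     if not isinstance(token, str):
--         raise ValueError("Expected string type for token, got %s" % type(token))
--
--     token = token.replace("\\", "\\\\").replace("_", "\\u")
--
--     if alphabet is not None:
--         chars = [c if c in alphabet and c != u"\n" else r"\%d;" % ord(c) for c in token]
--         token = ''.join(chars)
--
--     return token + "_"
-- ===== SOURCE B (Python) =====
-- def _escape_token(token, alphabet=None):
--     if not isinstance(token, str):
--         raise ValueError("Expected string type for token, got %s" % type(token))
--
--     out = []
--     for c in token:
--         exp = "\\\\" if c == "\\" else ("\\u" if c == "_" else c)
--         if alphabet is None:
--             out.append(exp)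
--         else:
--             for ch in exp:
--                 out.append(ch if ch in alphabet and ch != "\n" else r"\%d;" % ord(ch))
--     out.append("_")
--     return "".join(out)
-- ===== Notes on version B (the rewrite author's own statement) =====
-- stated objective: alternative
-- what changed: Replaces the two chained str.replace passes plus a list-comprehension pass (three traversals building intermediate strings) by a single fused loop over the original characters that expands each char and escapes the expanded chars in one pass.
import Mathlib
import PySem

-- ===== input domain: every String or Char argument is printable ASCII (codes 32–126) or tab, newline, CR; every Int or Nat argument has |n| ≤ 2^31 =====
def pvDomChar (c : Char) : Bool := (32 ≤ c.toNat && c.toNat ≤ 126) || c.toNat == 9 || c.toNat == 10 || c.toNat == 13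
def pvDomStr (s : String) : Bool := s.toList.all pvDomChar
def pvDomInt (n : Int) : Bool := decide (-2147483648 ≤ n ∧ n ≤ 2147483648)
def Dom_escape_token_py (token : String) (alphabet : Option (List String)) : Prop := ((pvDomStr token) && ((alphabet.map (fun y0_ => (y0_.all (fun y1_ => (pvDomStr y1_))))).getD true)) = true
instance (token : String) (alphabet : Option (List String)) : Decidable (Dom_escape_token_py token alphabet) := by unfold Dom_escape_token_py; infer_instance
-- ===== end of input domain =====

-- B replaces A's two chained .replace passes plus a comprehension by one fused fold over the
-- original characters (objective: alternative decomposition, single pass).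

-- ===== PORT A =====
-- r"\%d;" % ord(c)  (ported by hand: backslash, decimal digits of the code point, ';'; exact)
def pvOovEsc (c : Char) : List Char := '\\' :: PySem.Int.toChars (Int.ofNat c.toNat) ++ [';']

-- c in alphabet and c != "\n"  — the comprehension's condition on one character of the string
def pvKeep (a : List String) (c : Char) : Bool := a.contains (String.ofList [c]) && c != '\n'

def escape_token_py (token : String) (alphabet : Option (List String)) : String :=
  -- token = token.replace("\\", "\\\\").replace("_", "\\u")
  let t : List Char :=
    PySem.Chars.replace (PySem.Chars.replace token.toList ['\\'] ['\\', '\\']) ['_'] ['\\', 'u']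
  let t2 : List Char :=
    match alphabet with
    | none => t
    | some a =>
        -- chars = [c if c in alphabet and c != "\n" else r"\%d;" % ord(c) for c in token]; ''.join(chars)
        PySem.Chars.join [] (t.map (fun c => if pvKeep a c then [c] else pvOovEsc c))
  String.ofList (t2 ++ ['_'])

-- ===== PORT B =====
-- exp = "\\\\" if c == "\\" else ("\\u" if c == "_" else c)
def pvExpand (c : Char) : List Char :=
  if c = '\\' then ['\\', '\\'] else if c = '_' then ['\\', 'u'] else [c]

def escape_token_py_alt (token : String) (alphabet : Option (List String)) : String :=
  let out : List Char :=
    token.toList.foldl (fun acc c =>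
      let exp := pvExpand c
      match alphabet with
      | none => acc ++ exp
      | some a => acc ++ exp.flatMap (fun ch => if pvKeep a ch then [ch] else pvOovEsc ch)) []
  String.ofList (out ++ ['_'])

-- ===== PRECONDITION & SPEC =====
def Spec_escape_token_py (token : String) (alphabet : Option (List String)) (out : String) : Prop := out = escape_token_py_alt token alphabet
instance (token : String) (alphabet : Option (List String)) (out : String) : Decidable (Spec_escape_token_py token alphabet out) := by unfold Spec_escape_token_py; infer_instance

-- ===== CLAIM (what is proved, stated in full; the proofs are below) =====
def Claim_equal_escape_token_py : Prop := ∀ (token : String) (alphabet : Option (List String)), Dom_escape_token_py token alphabet → Spec_escape_token_py token alphabet (escape_token_py token alphabet)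

-- ===== LEMMAS AND PROOFS =====

-- single-character needle: Python's str.replace is a per-character expansion
theorem replace_go_single (o : Char) (new : List Char) :
    ∀ (fuel : Nat) (l acc : List Char), l.length ≤ fuel →
      PySem.Chars.replace.go [o] new fuel l acc
        = acc.reverse ++ l.flatMap (fun c => if c = o then new else [c]) := by
  intro fuel
  induction fuel with
  | zero =>
      intro l acc h
      have : l = [] := List.length_eq_zero_iff.mp (Nat.le_zero.mp h)
      subst this
      simp [PySem.Chars.replace.go]
  | succ n ih =>
      intro l acc h
      cases l with
      | nil => simp [PySem.Chars.replace.go]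
      | cons c t =>
          by_cases hc : c = o
          · subst hc
            have hpre : List.isPrefixOf [c] (c :: t) = true := by
              simp [List.isPrefixOf]
            rw [PySem.Chars.replace.go]
            simp only [hpre, if_true]
            simp only [List.length_cons] at h
            rw [ih _ _ (by simpa using Nat.le_of_succ_le_succ h)]
            simp
          · have hpre : List.isPrefixOf [o] (c :: t) = false := by
              simp [List.isPrefixOf, beq_eq_false_iff_ne]
              exact fun hh => hc hh.symm
            rw [PySem.Chars.replace.go]
            simp only [hpre, Bool.false_eq_true, if_false]
            simp only [List.length_cons] at h
            rw [ih _ _ (Nat.le_of_succ_le_succ h)]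
            simp [hc]

theorem replace_single (o : Char) (new : List Char) (s : List Char) :
    PySem.Chars.replace s [o] new = s.flatMap (fun c => if c = o then new else [c]) := by
  have : ([o] : List Char).isEmpty = false := rfl
  simp [PySem.Chars.replace, this]
  simpa using replace_go_single o new s.length s [] le_rfl

theorem join_empty_sep (parts : List (List Char)) :
    PySem.Chars.join [] parts = parts.flatten := by
  induction parts with
  | nil => simp [PySem.Chars.join_nil]
  | cons p rest ih =>
      cases rest with
      | nil => simp [PySem.Chars.join, List.intercalate]
      | cons q r =>
          rw [PySem.Chars.join_cons_cons]
          simp [ih]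

-- the two chained replaces expand each original character to pvExpand c
theorem expand_eq (c : Char) :
    ((if c = '\\' then ['\\', '\\'] else [c]).flatMap
        (fun d => if d = '_' then ['\\', 'u'] else [d])) = pvExpand c := by
  by_cases h1 : c = '\\' <;> by_cases h2 : c = '_' <;>
    simp_all [pvExpand]

-- ===== VERDICT (by name: the statement is the Claim_ definition above) =====
theorem escape_token_py_spec : Claim_equal_escape_token_py := by
  intro token alphabet _
  unfold Spec_escape_token_py escape_token_py escape_token_py_alt
  cases alphabet with
  | none =>
      simp only [replace_single, List.flatMap_assoc,
        PySem.List.foldl_append_eq_flatMap]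
      congr 2
      apply List.flatMap_congr
      intro c _
      exact expand_eq c
  | some a =>
      simp only [replace_single, List.flatMap_assoc, join_empty_sep,
        PySem.List.foldl_append_eq_flatMap, List.flatMap_def.symm,
        List.nil_append]
      congr 2
      apply List.flatMap_congr
      intro c _
      rw [← List.flatMap_assoc, expand_eq c]
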